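-- pv_equiv track=rewrite | github.com/Meganugger/PylaAI | state_finder/main.py | _normalize_reward_text
-- ===== SOURCE A (Python) =====
-- def _normalize_reward_text(text):
--     normalized = str(text or "").strip().lower()
--     replacements = {
--         "0": "o",
--         "1": "l",
--         "5": "s",
--         "6": "g",
--         "8": "b",
--         "!": "l",
--         "|": "l",
--         "$": "s",
--     }
--     for source, target in replacements.items():
--         normalized = normalized.replace(source, target)
--     return "".join(ch for ch in normalized if ch.isalnum())
-- ===== SOURCE B (Python) =====
-- def _normalize_reward_text(text):
--     s = str(text or "").strip().lower()
--     mapping = {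
--         "0": "o",
--         "1": "l",
--         "5": "s",
--         "6": "g",
--         "8": "b",
--         "!": "l",
--         "|": "l",
--         "$": "s",
--     }
--     out = []
--     for ch in s:
--         m = mapping.get(ch, ch)
--         if m.isalnum():
--             out.append(m)
--     return "".join(out)
-- ===== Notes on version B (the rewrite author's own statement) =====
-- stated objective: alternative
-- what changed: A makes nine full-string passes (eight str.replace scans then an isalnum filter); B makes a single char-by-char pass that looks each character up in the same 8-entry substitution table and keeps it only if the mapped character is alphanumeric.
import Mathlib
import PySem

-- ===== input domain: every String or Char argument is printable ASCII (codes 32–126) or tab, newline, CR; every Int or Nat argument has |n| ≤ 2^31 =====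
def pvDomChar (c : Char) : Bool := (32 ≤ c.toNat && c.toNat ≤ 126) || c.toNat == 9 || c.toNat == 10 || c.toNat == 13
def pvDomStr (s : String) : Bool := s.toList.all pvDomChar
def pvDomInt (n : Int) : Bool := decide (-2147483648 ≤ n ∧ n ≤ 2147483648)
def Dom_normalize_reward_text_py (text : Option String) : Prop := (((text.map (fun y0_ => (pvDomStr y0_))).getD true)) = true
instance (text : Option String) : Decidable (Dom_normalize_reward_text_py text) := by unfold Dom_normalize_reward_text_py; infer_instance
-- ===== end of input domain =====

-- B replaces A's eight sequential full-string .replace passes by ONE char-by-char pass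
-- (map each char through the same 8-entry table, keep it only if alphanumeric); same output.

-- ===== PORT A =====
-- literal transliteration of _normalize_reward_text: `text or ""` (None and "" both give ""),
-- strip+lower, a loop of str.replace over the dict's items in insertion order, then
-- "".join(ch for ch in normalized if ch.isalnum()) = String.ofList of the isalnum-filtered chars.
def normalize_reward_text_py (text : Option String) : String :=
  let normalized := PySem.Str.lower (PySem.Str.strip (text.getD ""))
  let replacements : PySem.Dict String String :=
    PySem.Dict.ofList [("0","o"),("1","l"),("5","s"),("6","g"),("8","b"),("!","l"),("|","l"),("$","s")]
  let normalized := replacements.items.foldl (fun n p => PySem.Str.replace n p.1 p.2) normalized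
  String.ofList (normalized.toList.filter PySem.Chars.isalnum)

-- ===== PORT B =====
def pvMapping : PySem.Dict Char Char :=
  PySem.Dict.ofList [('0','o'),('1','l'),('5','s'),('6','g'),('8','b'),('!','l'),('|','l'),('$','s')]

-- literal transliteration of Source B: same prefix, then one foldl over the chars:
-- m = mapping.get(ch, ch); append m iff m.isalnum(); "".join(out) = String.ofList out.
def normalize_reward_text_py_alt (text : Option String) : String :=
  let s := PySem.Str.lower (PySem.Str.strip (text.getD ""))
  String.ofList (s.toList.foldl
    (fun acc ch => if PySem.Chars.isalnum (pvMapping.getD ch ch)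
                   then acc ++ [pvMapping.getD ch ch] else acc) [])

-- ===== PRECONDITION & SPEC =====
def Spec_normalize_reward_text_py (text : Option String) (out : String) : Prop := out = normalize_reward_text_py_alt text
instance (text : Option String) (out : String) : Decidable (Spec_normalize_reward_text_py text out) := by unfold Spec_normalize_reward_text_py; infer_instance

-- ===== CLAIM (what is proved, stated in full; the proofs are below) =====
def Claim_equal_normalize_reward_text_py : Prop := ∀ (text : Option String), Dom_normalize_reward_text_py text → Spec_normalize_reward_text_py text (normalize_reward_text_py text)

-- ===== LEMMAS AND PROOFS =====

-- replacing a single-char pattern by a single char is a character map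
theorem pv_replace_go_single (a b : Char) :
    ∀ (fuel : Nat) (cs acc : List Char), cs.length ≤ fuel →
      PySem.Chars.replace.go [a] [b] fuel cs acc
        = acc.reverse ++ cs.map (fun c => if c = a then b else c) := by
  intro fuel
  induction fuel with
  | zero =>
    intro cs acc h
    match cs with
    | [] => simp [PySem.Chars.replace.go]
    | c :: t => simp at h
  | succ n ih =>
    intro cs acc h
    match cs with
    | [] => simp [PySem.Chars.replace.go]
    | c :: t =>
      have ht : t.length ≤ n := by simpa using h
      by_cases hc : c = a
      · subst hc
        have hpre : List.isPrefixOf [c] (c :: t) = true := by simp [List.isPrefixOf]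
        simp only [PySem.Chars.replace.go, hpre, if_pos]
        rw [show List.drop [c].length (c :: t) = t from rfl,
            show ([b].reverse ++ acc) = b :: acc from rfl,
            ih t (b :: acc) ht]
        simp
      · have hpre : List.isPrefixOf [a] (c :: t) = false := by
          simp only [List.isPrefixOf, Bool.and_true, beq_eq_false_iff_ne]
          exact fun h' => hc h'.symm
        simp only [PySem.Chars.replace.go, hpre, Bool.false_eq_true, if_false]
        rw [ih t (c :: acc) ht]
        simp [hc]

theorem pv_replace_single (a b : Char) (cs : List Char) :
    PySem.Chars.replace cs [a] [b] = cs.map (fun c => if c = a then b else c) := by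
  have h := pv_replace_go_single a b cs.length cs [] (le_refl _)
  simpa [PySem.Chars.replace] using h

-- the eight single-char substitutions applied in A's order compute B's table lookup
theorem pv_point (c : Char) :
    (fun c => if c = '$' then 's' else c)
      ((fun c => if c = '|' then 'l' else c)
        ((fun c => if c = '!' then 'l' else c)
          ((fun c => if c = '8' then 'b' else c)
            ((fun c => if c = '6' then 'g' else c)
              ((fun c => if c = '5' then 's' else c)
                ((fun c => if c = '1' then 'l' else c)
                  ((fun c => if c = '0' then 'o' else c) c)))))))
    = pvMapping.getD c c := by
  by_cases h0 : c = '0'; · subst h0; decide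
  by_cases h1 : c = '1'; · subst h1; decide
  by_cases h5 : c = '5'; · subst h5; decide
  by_cases h6 : c = '6'; · subst h6; decide
  by_cases h8 : c = '8'; · subst h8; decide
  by_cases hb : c = '!'; · subst hb; decide
  by_cases hp : c = '|'; · subst hp; decide
  by_cases hd : c = '$'; · subst hd; decide
  have hm : pvMapping = PySem.Dict.mk
      [('0','o'),('1','l'),('5','s'),('6','g'),('8','b'),('!','l'),('|','l'),('$','s')] := rfl
  have hnil : (PySem.Dict.mk ([] : List (Char × Char))).get? c = none := rfl
  rw [PySem.Dict.getD_eq_get?_getD, hm]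
  simp [PySem.Dict.get?_mk_cons, hnil, h0, h1, h5, h6, h8, hb, hp, hd,
        Ne.symm h0, Ne.symm h1, Ne.symm h5, Ne.symm h6, Ne.symm h8, Ne.symm hb, Ne.symm hp, Ne.symm hd]

-- A's eight map passes collapse to one map through B's table
theorem pv_maps (cs : List Char) :
    (((((((((cs.map (fun c => if c = '0' then 'o' else c)).map
        (fun c => if c = '1' then 'l' else c)).map
        (fun c => if c = '5' then 's' else c)).map
        (fun c => if c = '6' then 'g' else c)).map
        (fun c => if c = '8' then 'b' else c)).map
        (fun c => if c = '!' then 'l' else c)).map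
        (fun c => if c = '|' then 'l' else c)).map
        (fun c => if c = '$' then 's' else c)))
    = cs.map (fun c => pvMapping.getD c c) := by
  induction cs with
  | nil => rfl
  | cons c t ih =>
    simp only [List.map_cons]
    exact List.cons_eq_cons.mpr ⟨pv_point c, ih⟩

-- the heart: eight map passes + a final filter  =  B's single append-if foldl
theorem pv_main (cs : List Char) :
    (((((((((cs.map (fun c => if c = '0' then 'o' else c)).map
        (fun c => if c = '1' then 'l' else c)).map
        (fun c => if c = '5' then 's' else c)).map
        (fun c => if c = '6' then 'g' else c)).map
        (fun c => if c = '8' then 'b' else c)).map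
        (fun c => if c = '!' then 'l' else c)).map
        (fun c => if c = '|' then 'l' else c)).map
        (fun c => if c = '$' then 's' else c)).filter PySem.Chars.isalnum)
    = cs.foldl (fun acc ch => if PySem.Chars.isalnum (pvMapping.getD ch ch)
                              then acc ++ [pvMapping.getD ch ch] else acc) [] := by
  rw [PySem.List.foldl_append_if (fun ch => PySem.Chars.isalnum (pvMapping.getD ch ch))
        (fun ch => pvMapping.getD ch ch)]
  rw [List.nil_append, pv_maps, List.filter_map]
  rfl

-- ===== VERDICT (by name: the statement is the Claim_ definition above) =====
theorem normalize_reward_text_py_spec : Claim_equal_normalize_reward_text_py := by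
  intro text _
  simp only [Spec_normalize_reward_text_py, normalize_reward_text_py, normalize_reward_text_py_alt]
  have hitems : (PySem.Dict.ofList
      [("0","o"),("1","l"),("5","s"),("6","g"),("8","b"),("!","l"),("|","l"),("$","s")]
      : PySem.Dict String String).items
      = [("0","o"),("1","l"),("5","s"),("6","g"),("8","b"),("!","l"),("|","l"),("$","s")] := rfl
  rw [hitems]
  simp only [List.foldl_cons, List.foldl_nil]
  simp only [PySem.Str.toList_replace]
  rw [show ("0" : String).toList = ['0'] from rfl, show ("o" : String).toList = ['o'] from rfl,
      show ("1" : String).toList = ['1'] from rfl, show ("l" : String).toList = ['l'] from rfl,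
      show ("5" : String).toList = ['5'] from rfl, show ("s" : String).toList = ['s'] from rfl,
      show ("6" : String).toList = ['6'] from rfl, show ("g" : String).toList = ['g'] from rfl,
      show ("8" : String).toList = ['8'] from rfl, show ("b" : String).toList = ['b'] from rfl,
      show ("!" : String).toList = ['!'] from rfl, show ("|" : String).toList = ['|'] from rfl,
      show ("$" : String).toList = ['$'] from rfl]
  simp only [pv_replace_single]
  rw [pv_main]
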